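-- pv_equiv track=rewrite | github.com/i62abgai/MATD | week2/automatSearch.py | searchDFA
-- ===== SOURCE A (Python) =====
-- def getNext(pattern, lenPattern, state, char):
--     #If the character to process is the same as the one in the state position of the pattern we return the actual state+1
--     if state < lenPattern and char == ord(pattern[state]):
--         return state+1
--     i = 0
--     #We have to find the longest prefix that is also sufix
--     #We start from the number state (Is the largest value) and we decrease it in each iteration
--     for nextState in range(state,0,-1):
--         if ord(pattern[nextState-1]) == char:
--             while(i<nextState-1):
--                 if pattern[i] != pattern[state-nextState+1+i]:
--                     break
--                 i+=1
--             #If it matches then we return it, this should be the next state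
--             if i == nextState-1:
--                 return nextState
--     #If we dont get here means that in this state this character doesnt goes to another state
--     return 0
--
-- def buildSearchTable(pattern, lenPattern):
--     NCHARS = 256
--     #We build the table that allows us to look up for the next state
--     #The rows is the number of states, and the cols are the pattern + 1
--     searchTable = [[0 for i in range(NCHARS)] for _ in range(lenPattern+1)]
--
--     for state in range(lenPattern+1):
--         for char in range(NCHARS):
--             #For the position [state][char] in the table we get the next state
--             nextState = getNext(pattern, lenPattern, state, char)
--             searchTable[state][char] = nextState
--
--     return searchTable
--
-- def searchDFA(file, pattern):
--     matches = []
--     lenPattern = len(pattern)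
--     # Build the search table which make us able to search the next state
--     searchTable = buildSearchTable(pattern, lenPattern)
--     for index, line in enumerate(file):
--         lenLine = len(line)
--         state = 0
--         for i in range(lenLine):
--             #We get the next state for each character in line
--             state = searchTable[state][ord(line[i])]
--             #If the state matches the length of the pattern-1 this means there is a match
--             if state == (lenPattern-1):
--                 matches.append([index, i])
--     return matches
-- ===== SOURCE B (Python) =====
-- def searchDFA(file, pattern):
--     m = len(pattern)
--
--     # Transition of A's automaton for state s on character code c, computed on
--     # demand (ascending shift d = s-ns+1; the counter i persists across shifts).
--     def step(s, c):
--         if s < m and c == ord(pattern[s]):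
--             return s + 1
--         i = 0
--         for d in range(1, s + 1):
--             if ord(pattern[s - d]) == c:
--                 while i < s - d and pattern[i] == pattern[d + i]:
--                     i += 1
--                 if i == s - d:
--                     return s - d + 1
--         return 0
--
--     trans = {}
--     matches = []
--     for index, line in enumerate(file):
--         state = 0
--         for i, ch in enumerate(line):
--             c = ord(ch)
--             key = (state, c)
--             t = trans.get(key)
--             if t is None:
--                 t = step(state, c)
--                 trans[key] = t
--             state = t
--             if state == m - 1:
--                 matches.append([index, i])
--     return matches
-- ===== Notes on version B (the rewrite author's own statement) =====
-- stated objective: alternative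
-- what changed: B drops A's eagerly built (lenPattern+1)x256 transition table and instead computes transitions lazily, memoizing in a dict only the (state, character) pairs actually reached while scanning the lines; the transition function reproduces A's exactly (including its persistent fallback counter and the state == lenPattern-1 report rule).
import Mathlib
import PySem

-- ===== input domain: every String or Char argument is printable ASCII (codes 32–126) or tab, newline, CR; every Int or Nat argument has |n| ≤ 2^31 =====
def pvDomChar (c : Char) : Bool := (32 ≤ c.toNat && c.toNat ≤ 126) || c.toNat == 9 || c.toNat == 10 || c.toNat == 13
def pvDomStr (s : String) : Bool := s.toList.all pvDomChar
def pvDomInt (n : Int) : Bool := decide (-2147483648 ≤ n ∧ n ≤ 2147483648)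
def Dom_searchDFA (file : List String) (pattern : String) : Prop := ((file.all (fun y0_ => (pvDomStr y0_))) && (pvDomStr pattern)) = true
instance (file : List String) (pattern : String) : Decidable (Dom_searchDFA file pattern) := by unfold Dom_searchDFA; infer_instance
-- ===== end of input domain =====

-- B replaces A's eager (lenPattern+1)×256 transition table by lazily memoized
-- transitions computed only for the (state, character) pairs actually reached;
-- the transition function itself reproduces A's exactly (including its
-- persistent fallback counter i and the state == lenPattern-1 report rule).

-- ===== PORT A =====
-- shared guarded indexing: pattern[k] / ord(pattern[k]); every executed access
-- is in range in the Python (the .getD default is never consulted there)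
def pvCharAt (p : List Char) (k : Int) : Char := (PySem.List.pyGet? p k).getD (Char.ofNat 0)
def pvOrdAt (p : List Char) (k : Int) : Int := ((PySem.List.pyGet? p k).map (fun c => (c.toNat : Int))).getD 0

-- the 'while(i<nextState-1)' loop of getNext (breaks on mismatch, returns final i)
def gnWhile (p : List Char) (state ns i : Int) : Int :=
  if _h : i < ns - 1 then
    if pvCharAt p i ≠ pvCharAt p (state - ns + 1 + i) then i
    else gnWhile p state ns (i + 1)
  else i
termination_by (ns - 1 - i).toNat
decreasing_by omega

-- the 'for nextState in range(state,0,-1)' loop; i persists across iterations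
def gnFor (p : List Char) (state char : Int) : List Int → Int → Int
  | [], _ => 0
  | ns :: rest, i =>
    if pvOrdAt p (ns - 1) = char then
      let i' := gnWhile p state ns i
      if i' = ns - 1 then ns else gnFor p state char rest i'
    else gnFor p state char rest i

def getNext (pattern : String) (lenPattern state char : Int) : Int :=
  if state < lenPattern ∧ char = pvOrdAt pattern.toList state then state + 1
  else gnFor pattern.toList state char (PySem.List.pyRange state 0 (-1)) 0

def buildSearchTable (pattern : String) (lenPattern : Int) : List (List Int) :=
  (PySem.List.pyRange 0 (lenPattern + 1) 1).map (fun state =>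
    (PySem.List.pyRange 0 256 1).map (fun char => getNext pattern lenPattern state char))

-- searchTable[state][ord(line[i])] (always in range when executed on Dom)
def pvTableGet (t : List (List Int)) (s c : Int) : Int :=
  PySem.List.pyGetD (PySem.List.pyGetD t s []) c 0

def searchDFA (file : List String) (pattern : String) : List (List Int) :=
  let lenPattern := PySem.Str.len pattern
  let table := buildSearchTable pattern lenPattern
  (PySem.List.enumerate file 0).foldl
    (fun (ms : List (List Int)) (il : Int × String) =>
      ((PySem.List.pyRange 0 (PySem.Str.len il.2) 1).foldl
        (fun (acc : Int × List (List Int)) (i : Int) =>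
          let st := pvTableGet table acc.1 (pvOrdAt il.2.toList i)
          (st, if st = lenPattern - 1 then acc.2 ++ [[il.1, i]] else acc.2))
        (0, ms)).2)
    []

-- ===== PORT B =====
-- the 'while i < s - d and pattern[i] == pattern[d + i]' loop of Source B's step
def stWhile (p : List Char) (s d i : Int) : Int :=
  if _h : i < s - d ∧ pvCharAt p i = pvCharAt p (d + i) then stWhile p s d (i + 1) else i
termination_by (s - d - i).toNat
decreasing_by omega

-- the 'for d in range(1, s + 1)' loop; i persists across iterations
def stFor (p : List Char) (s c : Int) : List Int → Int → Int
  | [], _ => 0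
  | d :: rest, i =>
    if pvOrdAt p (s - d) = c then
      let i' := stWhile p s d i
      if i' = s - d then s - d + 1 else stFor p s c rest i'
    else stFor p s c rest i

-- Source B's step(s, c)
def stepB (p : List Char) (m s c : Int) : Int :=
  if s < m ∧ c = pvOrdAt p s then s + 1
  else stFor p s c (PySem.List.pyRange 1 (s + 1) 1) 0

def searchDFA_alt (file : List String) (pattern : String) : List (List Int) :=
  let p := pattern.toList
  let m := PySem.Str.len pattern
  ((PySem.List.enumerate file 0).foldl
    (fun (acc : PySem.Dict (Int × Int) Int × List (List Int)) (il : Int × String) =>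
      let inner := (PySem.List.enumerate il.2.toList 0).foldl
        (fun (st : PySem.Dict (Int × Int) Int × Int × List (List Int)) (ic : Int × Char) =>
          let c : Int := (ic.2.toNat : Int)
          let tt : PySem.Dict (Int × Int) Int × Int :=
            match st.1.get? (st.2.1, c) with
            | some t => (st.1, t)
            | none => (st.1.insert (st.2.1, c) (stepB p m st.2.1 c), stepB p m st.2.1 c)
          (tt.1, tt.2, if tt.2 = m - 1 then st.2.2 ++ [[il.1, ic.1]] else st.2.2))
        (acc.1, 0, acc.2)
      (inner.1, inner.2.2))
    (PySem.Dict.empty, [])).2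

-- ===== PRECONDITION & SPEC =====
def Spec_searchDFA (file : List String) (pattern : String) (out : List (List Int)) : Prop := out = searchDFA_alt file pattern
instance (file : List String) (pattern : String) (out : List (List Int)) : Decidable (Spec_searchDFA file pattern out) := by unfold Spec_searchDFA; infer_instance

-- ===== CLAIM (what is proved, stated in full; the proofs are below) =====
def Claim_equal_searchDFA : Prop := ∀ (file : List String) (pattern : String), Dom_searchDFA file pattern → Spec_searchDFA file pattern (searchDFA file pattern)

-- ===== LEMMAS AND PROOFS =====

-- the memo dict only ever holds correct transitions
def pvInv (pattern : String) (tr : PySem.Dict (Int × Int) Int) : Prop :=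
  ∀ s c t, tr.get? (s, c) = some t → t = stepB pattern.toList (PySem.Str.len pattern) s c

theorem stWhile_eq_gnWhile (p : List Char) (s ns : Int) :
    ∀ i, stWhile p s (s - ns + 1) i = gnWhile p s ns i := by
  suffices H : ∀ (k : Nat) (i : Int), ns - 1 - i ≤ (k : Int) →
      stWhile p s (s - ns + 1) i = gnWhile p s ns i by
    intro i; exact H (ns - 1 - i).toNat i (by omega)
  intro k
  induction k with
  | zero =>
    intro i h
    rw [stWhile, gnWhile]
    rw [dif_neg (by omega), dif_neg (fun hc => by omega)]
  | succ k ih =>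
    intro i h
    rw [stWhile, gnWhile]
    by_cases hlt : i < ns - 1
    · rw [dif_pos hlt]
      by_cases heq : pvCharAt p i = pvCharAt p (s - ns + 1 + i)
      · rw [dif_pos ⟨by omega, heq⟩, if_neg (by simp [heq])]
        exact ih (i + 1) (by omega)
      · rw [dif_neg (fun hc => heq hc.2), if_pos heq]
    · rw [dif_neg hlt, dif_neg (fun hc => by omega)]
theorem stFor_eq_gnFor (p : List Char) (s c : Int) :
    ∀ (k : Nat) (n i : Int), n ≤ (k : Int) →
      gnFor p s c (PySem.List.pyRange n 0 (-1)) i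
        = stFor p s c (PySem.List.pyRange (s - n + 1) (s + 1) 1) i := by
  intro k
  induction k with
  | zero =>
    intro n i hn
    rw [PySem.List.pyRange_neg_one_eq_nil (by omega),
        PySem.List.pyRange_one_eq_nil (by omega)]
    rfl
  | succ k ih =>
    intro n i hn
    by_cases hpos : 0 < n
    · rw [PySem.List.pyRange_neg_one_cons (by omega),
          PySem.List.pyRange_one_cons (by omega)]
      show (if pvOrdAt p (n - 1) = c then
              let i' := gnWhile p s n i
              if i' = n - 1 then n else gnFor p s c (PySem.List.pyRange (n-1) 0 (-1)) i'
            else gnFor p s c (PySem.List.pyRange (n-1) 0 (-1)) i)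
          = (if pvOrdAt p (s - (s - n + 1)) = c then
              let i' := stWhile p s (s - n + 1) i
              if i' = s - (s - n + 1) then s - (s - n + 1) + 1
              else stFor p s c (PySem.List.pyRange (s - n + 1 + 1) (s + 1) 1) i'
            else stFor p s c (PySem.List.pyRange (s - n + 1 + 1) (s + 1) 1) i)
      rw [show s - (s - n + 1) = n - 1 by ring, stWhile_eq_gnWhile,
          show s - n + 1 + 1 = s - (n - 1) + 1 by ring, show n - 1 + 1 = n by ring]
      by_cases hc : pvOrdAt p (n - 1) = c
      · rw [if_pos hc, if_pos hc]
        by_cases hi : gnWhile p s n i = n - 1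
        · rw [if_pos hi, if_pos hi]
        · rw [if_neg hi, if_neg hi]
          exact ih (n - 1) _ (by omega)
      · rw [if_neg hc, if_neg hc]
        exact ih (n - 1) _ (by omega)
    · rw [PySem.List.pyRange_neg_one_eq_nil (by omega),
          PySem.List.pyRange_one_eq_nil (by omega)]
      rfl
theorem stepB_eq_getNext (pattern : String) (m s c : Int) :
    stepB pattern.toList m s c = getNext pattern m s c := by
  rw [stepB, getNext]
  by_cases h : s < m ∧ c = pvOrdAt pattern.toList s
  · rw [if_pos h, if_pos h]
  · rw [if_neg h, if_neg h,
        stFor_eq_gnFor pattern.toList s c s.toNat s 0 (by omega),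
        show s - s + 1 = 1 by ring]

theorem pvTableGet_build (pattern : String) (m s c : Int)
    (hs0 : 0 ≤ s) (hs1 : s < m + 1) (hc0 : 0 ≤ c) (hc1 : c < 256) :
    pvTableGet (buildSearchTable pattern m) s c = getNext pattern m s c := by
  rw [pvTableGet, buildSearchTable,
      PySem.List.pyGetD_map_pyRange_of_nonneg _ _ _ _ hs0 hs1,
      PySem.List.pyGetD_map_pyRange_of_nonneg _ _ _ _ hc0 hc1]

theorem stFor_bounds (p : List Char) (s c : Int) :
    ∀ (l : List Int) (i : Int), (∀ d ∈ l, 1 ≤ d ∧ d ≤ s) →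
      stFor p s c l i = 0 ∨ (1 ≤ stFor p s c l i ∧ stFor p s c l i ≤ s) := by
  intro l
  induction l with
  | nil => intro i _; left; rfl
  | cons d rest ih =>
    intro i hmem
    have hd := hmem d (List.mem_cons_self ..)
    rw [stFor]
    by_cases hc : pvOrdAt p (s - d) = c
    · rw [if_pos hc]
      by_cases hi : stWhile p s d i = s - d
      · simp only [if_pos hi]; right; omega
      · simp only [if_neg hi]
        exact ih _ (fun x hx => hmem x (List.mem_cons_of_mem _ hx))
    · rw [if_neg hc]
      exact ih _ (fun x hx => hmem x (List.mem_cons_of_mem _ hx))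

theorem stepB_bounds (p : List Char) (m s c : Int) (hs0 : 0 ≤ s) (hs1 : s ≤ m) :
    0 ≤ stepB p m s c ∧ stepB p m s c ≤ m := by
  rw [stepB]
  by_cases h : s < m ∧ c = pvOrdAt p s
  · rw [if_pos h]; omega
  · rw [if_neg h]
    have := stFor_bounds p s c (PySem.List.pyRange 1 (s + 1) 1) 0
      (fun d hd => by rw [PySem.List.mem_pyRange_one] at hd; omega)
    omega

-- A's per-character fold body (table lookup) and Source B's (memoized step), named for the proofs
def pvFA (pattern : String) (il : Int × String) (acc : Int × List (List Int)) (i : Int) :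
    Int × List (List Int) :=
  let st := pvTableGet (buildSearchTable pattern (PySem.Str.len pattern)) acc.1 (pvOrdAt il.2.toList i)
  (st, if st = PySem.Str.len pattern - 1 then acc.2 ++ [[il.1, i]] else acc.2)

def pvFB (pattern : String) (il : Int × String)
    (st : PySem.Dict (Int × Int) Int × Int × List (List Int)) (ic : Int × Char) :
    PySem.Dict (Int × Int) Int × Int × List (List Int) :=
  let c : Int := (ic.2.toNat : Int)
  let tt : PySem.Dict (Int × Int) Int × Int :=
    match st.1.get? (st.2.1, c) with
    | some t => (st.1, t)
    | none => (st.1.insert (st.2.1, c) (stepB pattern.toList (PySem.Str.len pattern) st.2.1 c),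
               stepB pattern.toList (PySem.Str.len pattern) st.2.1 c)
  (tt.1, tt.2, if tt.2 = PySem.Str.len pattern - 1 then st.2.2 ++ [[il.1, ic.1]] else st.2.2)

theorem inner_eq (pattern : String) (il : Int × String)
    (hline : ∀ ch ∈ il.2.toList, pvDomChar ch = true) :
    ∀ (l : List Int), (∀ j ∈ l, 0 ≤ j ∧ j < (il.2.toList.length : Int)) →
    ∀ (s : Int), 0 ≤ s → s ≤ PySem.Str.len pattern →
    ∀ (ms : List (List Int)) (tr : PySem.Dict (Int × Int) Int), pvInv pattern tr →
      (l.foldl (pvFA pattern il) (s, ms)).1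
        = (l.foldl (fun st j => pvFB pattern il st (j, PySem.List.pyGetD il.2.toList j (Char.ofNat 0))) (tr, s, ms)).2.1
      ∧ (l.foldl (pvFA pattern il) (s, ms)).2
        = (l.foldl (fun st j => pvFB pattern il st (j, PySem.List.pyGetD il.2.toList j (Char.ofNat 0))) (tr, s, ms)).2.2
      ∧ pvInv pattern (l.foldl (fun st j => pvFB pattern il st (j, PySem.List.pyGetD il.2.toList j (Char.ofNat 0))) (tr, s, ms)).1 := by
  intro l
  induction l with
  | nil => intro _ s hs0 hs1 ms tr htr; exact ⟨rfl, rfl, htr⟩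
  | cons j rest ih =>
    intro hmem s hs0 hs1 ms tr htr
    have hj := hmem j (List.mem_cons_self ..)
    have hrest := fun x hx => hmem x (List.mem_cons_of_mem _ hx)
    have hch : PySem.List.pyGetD il.2.toList j (Char.ofNat 0) = il.2.toList[j.toNat] :=
      PySem.List.pyGetD_eq_getElem _ _ hj.1 hj.2
    have hjn : j.toNat < il.2.toList.length := by omega
    have hle : (il.2.toList[j.toNat].toNat : Int) ≤ 126 := by
      have := hline _ (List.getElem_mem hjn)
      simp [pvDomChar] at this; omega
    have hord : pvOrdAt il.2.toList j = ((il.2.toList[j.toNat].toNat : Nat) : Int) := by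
      rw [pvOrdAt, PySem.List.pyGet?_eq_some_getElem _ hj.1 hj.2]; rfl
    have hst : pvTableGet (buildSearchTable pattern (PySem.Str.len pattern)) s (pvOrdAt il.2.toList j)
        = stepB pattern.toList (PySem.Str.len pattern) s ((il.2.toList[j.toNat].toNat : Nat) : Int) := by
      rw [hord,
        pvTableGet_build pattern (PySem.Str.len pattern) s _ hs0 (by omega) (by positivity) (by omega),
        stepB_eq_getNext]
    have hbounds := stepB_bounds pattern.toList (PySem.Str.len pattern) s
      ((il.2.toList[j.toNat].toNat : Nat) : Int) hs0 hs1
    have hA : pvFA pattern il (s, ms) j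
        = (stepB pattern.toList (PySem.Str.len pattern) s ((il.2.toList[j.toNat].toNat : Nat) : Int),
           if stepB pattern.toList (PySem.Str.len pattern) s ((il.2.toList[j.toNat].toNat : Nat) : Int)
              = PySem.Str.len pattern - 1
           then ms ++ [[il.1, j]] else ms) := by
      rw [pvFA]; simp only [hst]
    simp only [List.foldl_cons, hA]
    cases h : tr.get? (s, ((il.2.toList[j.toNat].toNat : Nat) : Int)) with
    | some t =>
      have ht := htr _ _ _ h
      have hB : pvFB pattern il (tr, s, ms) (j, PySem.List.pyGetD il.2.toList j (Char.ofNat 0))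
          = (tr, stepB pattern.toList (PySem.Str.len pattern) s ((il.2.toList[j.toNat].toNat : Nat) : Int),
             if stepB pattern.toList (PySem.Str.len pattern) s ((il.2.toList[j.toNat].toNat : Nat) : Int)
                = PySem.Str.len pattern - 1
             then ms ++ [[il.1, j]] else ms) := by
        rw [pvFB]; simp only [hch]
        rw [h, ← ht]
      rw [hB]
      exact ih hrest _ hbounds.1 hbounds.2 _ _ htr
    | none =>
      have hB : pvFB pattern il (tr, s, ms) (j, PySem.List.pyGetD il.2.toList j (Char.ofNat 0))
          = (tr.insert (s, ((il.2.toList[j.toNat].toNat : Nat) : Int))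
               (stepB pattern.toList (PySem.Str.len pattern) s ((il.2.toList[j.toNat].toNat : Nat) : Int)),
             stepB pattern.toList (PySem.Str.len pattern) s ((il.2.toList[j.toNat].toNat : Nat) : Int),
             if stepB pattern.toList (PySem.Str.len pattern) s ((il.2.toList[j.toNat].toNat : Nat) : Int)
                = PySem.Str.len pattern - 1
             then ms ++ [[il.1, j]] else ms) := by
        rw [pvFB]; simp only [hch]
        rw [h]
      have htr' : pvInv pattern (tr.insert (s, ((il.2.toList[j.toNat].toNat : Nat) : Int))
          (stepB pattern.toList (PySem.Str.len pattern) s ((il.2.toList[j.toNat].toNat : Nat) : Int))) := by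
        intro s' c' t' h'
        rw [PySem.Dict.get?_insert] at h'
        by_cases hk : (s', c') = (s, ((il.2.toList[j.toNat].toNat : Nat) : Int))
        · rw [if_pos hk] at h'
          cases hk
          cases h'
          rfl
        · rw [if_neg hk] at h'
          exact htr _ _ _ h'
      rw [hB]
      exact ih hrest _ hbounds.1 hbounds.2 _ _ htr'

theorem outer_eq (pattern : String) :
    ∀ (files : List String), (∀ ln ∈ files, pvDomStr ln = true) →
    ∀ (k : Int) (ms : List (List Int)) (tr : PySem.Dict (Int × Int) Int), pvInv pattern tr →
      (PySem.List.enumerate files k).foldl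
          (fun ms il => ((PySem.List.pyRange 0 (PySem.Str.len il.2) 1).foldl (pvFA pattern il) (0, ms)).2) ms
        = ((PySem.List.enumerate files k).foldl
            (fun acc il =>
              ((((PySem.List.enumerate il.2.toList 0).foldl (pvFB pattern il) (acc.1, 0, acc.2))).1,
               (((PySem.List.enumerate il.2.toList 0).foldl (pvFB pattern il) (acc.1, 0, acc.2))).2.2))
            (tr, ms)).2
      ∧ pvInv pattern ((PySem.List.enumerate files k).foldl
            (fun acc il =>
              ((((PySem.List.enumerate il.2.toList 0).foldl (pvFB pattern il) (acc.1, 0, acc.2))).1,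
               (((PySem.List.enumerate il.2.toList 0).foldl (pvFB pattern il) (acc.1, 0, acc.2))).2.2))
            (tr, ms)).1 := by
  intro files
  induction files with
  | nil => intro _ k ms tr htr; exact ⟨rfl, htr⟩
  | cons line rest ih =>
    intro hdom k ms tr htr
    have hline : ∀ ch ∈ line.toList, pvDomChar ch = true := by
      have := hdom line (List.mem_cons_self ..)
      simpa [pvDomStr, List.all_eq_true] using this
    have hrest := fun x hx => hdom x (List.mem_cons_of_mem _ hx)
    rw [PySem.List.enumerate_cons]
    simp only [List.foldl_cons]
    have hbridge : (PySem.List.enumerate line.toList 0).foldl (pvFB pattern (k, line)) (tr, 0, ms)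
        = (PySem.List.pyRange 0 (PySem.Str.len line) 1).foldl
            (fun st j => pvFB pattern (k, line) st (j, PySem.List.pyGetD line.toList j (Char.ofNat 0)))
            (tr, 0, ms) := by
      rw [PySem.List.enumerate_eq_map_pyRange line.toList (Char.ofNat 0), List.foldl_map]
      rw [show PySem.List.len line.toList = PySem.Str.len line by
            rw [PySem.List.len_eq, PySem.Str.len_eq]]
    have hmem : ∀ j ∈ PySem.List.pyRange 0 (PySem.Str.len line) 1,
        0 ≤ j ∧ j < (line.toList.length : Int) := by
      intro j hjm
      rw [PySem.List.mem_pyRange_one] at hjm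
      rw [PySem.Str.len_eq] at hjm
      omega
    have hm0 : (0 : Int) ≤ PySem.Str.len pattern := by rw [PySem.Str.len_eq]; positivity
    have hinner := inner_eq pattern (k, line) hline
      (PySem.List.pyRange 0 (PySem.Str.len line) 1) hmem 0 le_rfl hm0 ms tr htr
    rw [hbridge]
    rw [← hinner.2.1]
    exact ih hrest (k + 1) _ _ hinner.2.2

-- ===== VERDICT (by name: the statement is the Claim_ definition above) =====
theorem searchDFA_spec : Claim_equal_searchDFA := by
  intro file pattern hdom
  unfold Spec_searchDFA searchDFA searchDFA_alt
  have hdom' : ∀ ln ∈ file, pvDomStr ln = true := by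
    simp only [Dom_searchDFA, Bool.and_eq_true, List.all_eq_true] at hdom
    exact fun ln h => hdom.1 ln h
  have h := outer_eq pattern file hdom' 0 [] PySem.Dict.empty
    (fun s c t h => by rw [PySem.Dict.get?_empty] at h; cases h)
  exact h.1
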